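-- pv_equiv track=rewrite | github.com/ShiftingNova/project5 | diction.py | indices_of_words
-- ===== SOURCE A (Python) =====
-- def indices_of_words(strings):
--     results = {}
--     for index in range(len(strings)):
--         words = strings[index].split(" ")
--         for word in words:
--             if word not in results:
--                 results[word] = [index]
--             else:
--                 if index not in results[word]:
--                     results[word].append(index)
--     return results
-- ===== SOURCE B (Python) =====
-- def indices_of_words(strings):
--     all_words = [s.split(" ") for s in strings]
--     order = dict.fromkeys(w for ws in all_words for w in ws)
--     return {w: [i for i, ws in enumerate(all_words) if w in ws] for w in order}
-- ===== Notes on version B (the rewrite author's own statement) =====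
-- stated objective: alternative
-- what changed: Replaces A's single pass that incrementally maintains per-word index lists inside a dict (with membership checks on each list) by an inverted two-phase scheme: first compute the word order as dict.fromkeys over all split words, then build each word's index list independently as a filtered enumerate comprehension over the pre-split strings.
import Mathlib
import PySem

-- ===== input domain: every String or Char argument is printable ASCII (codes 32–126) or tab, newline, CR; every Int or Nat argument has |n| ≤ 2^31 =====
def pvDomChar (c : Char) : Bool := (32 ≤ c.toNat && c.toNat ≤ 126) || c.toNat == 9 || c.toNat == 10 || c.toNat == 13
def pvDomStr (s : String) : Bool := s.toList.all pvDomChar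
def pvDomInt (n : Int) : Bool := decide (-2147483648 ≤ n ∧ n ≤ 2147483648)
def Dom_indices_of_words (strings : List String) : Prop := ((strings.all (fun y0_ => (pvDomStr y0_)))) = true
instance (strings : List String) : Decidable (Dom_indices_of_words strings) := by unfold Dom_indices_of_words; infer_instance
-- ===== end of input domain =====

-- B replaces A's incremental per-word list maintenance inside one dict pass by a two-phase
-- inverted-index build (word order via dict.fromkeys, then one filtered enumerate scan per word);
-- alternative decomposition, no speed claim.

-- s.split(" "): the separator is the nonempty literal " ", so Python never raises and
-- PySem.Str.split? is always `some`; the getD [] default is unreachable (exact).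
def pvSplit (s : String) : List String := (PySem.Str.split? s " ").getD []

-- ===== PORT A =====
def indices_of_words (strings : List String) : List (String × List Int) :=
  (((PySem.List.pyRange 0 (strings.length : Int) 1).foldl (fun results index =>
      let words := pvSplit (PySem.List.pyGetD strings index "")
      words.foldl (fun results word =>
        match results.get? word with
        | none => results.insert word [index]
        | some l => if index ∈ l then results else results.insert word (l ++ [index]))
        results)
    PySem.Dict.empty)).items

-- ===== PORT B =====
def indices_of_words_alt (strings : List String) : List (String × List Int) :=
  let allWords := strings.map (fun s => pvSplit s)
  let order := PySem.List.dedup (allWords.flatMap (fun ws => ws))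
  order.map (fun w =>
    (w, ((PySem.List.enumerate allWords 0).filter (fun p => decide (w ∈ p.2))).map (fun p => p.1)))

-- ===== PRECONDITION & SPEC =====
def Spec_indices_of_words (strings : List String) (out : List (String × List Int)) : Prop := out = indices_of_words_alt strings
instance (strings : List String) (out : List (String × List Int)) : Decidable (Spec_indices_of_words strings out) := by unfold Spec_indices_of_words; infer_instance

-- ===== CLAIM (what is proved, stated in full; the proofs are below) =====
def Claim_equal_indices_of_words : Prop := ∀ (strings : List String), Dom_indices_of_words strings → Spec_indices_of_words strings (indices_of_words strings)

-- ===== LEMMAS AND PROOFS =====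

-- the value A stores for word w at index i, written as an always-insert form
def pvNv (i : Int) (d : PySem.Dict String (List Int)) (w : String) : List Int :=
  match d.get? w with
  | none => [i]
  | some l => if i ∈ l then l else l ++ [i]

def pvInner (i : Int) (d : PySem.Dict String (List Int)) (ws : List String) : PySem.Dict String (List Int) :=
  ws.foldl (fun d w => d.insert w (pvNv i d w)) d

def pvProc (ps : List (Int × String)) (d : PySem.Dict String (List Int)) : PySem.Dict String (List Int) :=
  ps.foldl (fun d p => pvInner p.1 d (pvSplit p.2)) d

def pvMv (ps : List (Int × String)) (w : String) : List Int :=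
  (ps.filter (fun p => decide (w ∈ pvSplit p.2))).map (fun p => p.1)

-- inserting the value already stored at an existing key is a no-op
theorem pv_insert_self (d : PySem.Dict String (List Int)) (k : String) (v : List Int)
    (hnd : d.keys.Nodup) (hv : d.get? k = some v) : d.insert k v = d := by
  apply PySem.Dict.ext
  have hc : d.contains k = true := by rw [PySem.Dict.contains_eq_isSome_get?, hv]; rfl
  rw [PySem.Dict.items_insert_of_contains (h := hc)]
  conv_rhs => rw [← List.map_id d.items]
  apply List.map_congr_left
  rintro ⟨a, b⟩ hp
  by_cases h : a = k
  · subst h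
    have h2 : d.get? a = some b := PySem.Dict.get?_of_mem_items d hp hnd
    rw [hv] at h2
    simp [Option.some.inj h2]
  · simp [h]

-- A's match-step equals the always-insert step on any dict with unique keys
theorem pv_stepA_eq (d : PySem.Dict String (List Int)) (i : Int) (w : String)
    (hnd : d.keys.Nodup) :
    (match d.get? w with
     | none => d.insert w [i]
     | some l => if i ∈ l then d else d.insert w (l ++ [i])) = d.insert w (pvNv i d w) := by
  cases h : d.get? w with
  | none => simp [pvNv, h]
  | some l =>
    by_cases hi : i ∈ l
    · simp [pvNv, h, hi, pv_insert_self d w l hnd h]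
    · simp [pvNv, h, hi]

-- foldl congruence under the unique-keys invariant
theorem pv_foldl_congr {α : Type} (f g : PySem.Dict String (List Int) → α → PySem.Dict String (List Int))
    (h1 : ∀ d a, d.keys.Nodup → f d a = g d a)
    (h2 : ∀ d a, d.keys.Nodup → (g d a).keys.Nodup) :
    ∀ (l : List α) (d : PySem.Dict String (List Int)), d.keys.Nodup → l.foldl f d = l.foldl g d := by
  intro l
  induction l with
  | nil => intro d _; rfl
  | cons a t ih =>
    intro d hd
    simp only [List.foldl_cons]
    rw [h1 d a hd]
    exact ih (g d a) (h2 d a hd)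

theorem pv_nodup_inner (i : Int) (d : PySem.Dict String (List Int)) (ws : List String)
    (hnd : d.keys.Nodup) : (pvInner i d ws).keys.Nodup := by
  unfold pvInner
  exact PySem.Dict.nodup_keys_foldl_insert ws (fun d w => pvNv i d w) d hnd

theorem pv_keys_inner (i : Int) (d : PySem.Dict String (List Int)) (ws : List String) :
    (pvInner i d ws).keys = PySem.Set.update d.keys ws := by
  unfold pvInner
  exact PySem.Dict.keys_foldl_insert ws (fun d w => pvNv i d w) d

theorem pv_inner_get? (i : Int) (d : PySem.Dict String (List Int)) (ws : List String) (v : String)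
    (hi : ∀ w l, d.get? w = some l → i ∉ l) :
    (pvInner i d ws).get? v =
      match d.get? v with
      | some l => some (if v ∈ ws then l ++ [i] else l)
      | none => if v ∈ ws then some [i] else none := by
  induction ws using List.reverseRecOn generalizing v with
  | nil => cases h : d.get? v <;> simp [pvInner, h]
  | append_singleton ws w ih =>
    have step : pvInner i d (ws ++ [w]) = (pvInner i d ws).insert w (pvNv i (pvInner i d ws) w) := by
      simp only [pvInner, List.foldl_append, List.foldl_cons, List.foldl_nil]
    rw [step, PySem.Dict.get?_insert]
    have hnv : pvNv i (pvInner i d ws) w = (match d.get? w with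
        | some l => l ++ [i]
        | none => [i]) := by
      cases hd : d.get? w with
      | some l =>
        have hil : i ∉ l := hi w l hd
        by_cases hw : w ∈ ws <;> simp [pvNv, ih w, hd, hw, hil]
      | none =>
        by_cases hw : w ∈ ws <;> simp [pvNv, ih w, hd, hw]
    by_cases hvw : v = w
    · subst hvw
      cases hd : d.get? v <;> simp [hnv, hd]
    · rw [if_neg hvw, ih v]
      cases hd : d.get? v <;> simp [List.mem_append, hvw]

theorem pv_nodup_proc (ps : List (Int × String)) (d : PySem.Dict String (List Int))
    (hnd : d.keys.Nodup) : (pvProc ps d).keys.Nodup := by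
  induction ps generalizing d with
  | nil => exact hnd
  | cons p tl ih =>
    simp only [pvProc, List.foldl_cons]
    exact ih (pvInner p.1 d (pvSplit p.2)) (pv_nodup_inner _ _ _ hnd)

theorem pv_keys_proc (ps : List (Int × String)) (d : PySem.Dict String (List Int)) :
    (pvProc ps d).keys = PySem.Set.update d.keys (ps.flatMap (fun p => pvSplit p.2)) := by
  induction ps generalizing d with
  | nil => simp [pvProc, PySem.Set.update_nil]
  | cons p tl ih =>
    simp only [pvProc, List.foldl_cons, List.flatMap_cons]
    rw [show (List.foldl (fun d p => pvInner p.1 d (pvSplit p.2)) (pvInner p.1 d (pvSplit p.2)) tl) = pvProc tl (pvInner p.1 d (pvSplit p.2)) from rfl]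
    rw [ih, pv_keys_inner, PySem.Set.update_append]

theorem pv_proc_get? (ps : List (Int × String)) (d : PySem.Dict String (List Int)) (v : String)
    (hnd : d.keys.Nodup)
    (hlt : ∀ w l, d.get? w = some l → ∀ j ∈ l, ∀ p ∈ ps, j < p.1)
    (hps : ps.Pairwise (fun p q => p.1 < q.1)) :
    (pvProc ps d).get? v =
      match d.get? v with
      | some l => some (l ++ pvMv ps v)
      | none => if v ∈ ps.flatMap (fun p => pvSplit p.2) then some (pvMv ps v) else none := by
  induction ps generalizing d v with
  | nil => cases h : d.get? v <;> simp [pvProc, pvMv, h]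
  | cons p tl ih =>
    rw [List.pairwise_cons] at hps
    obtain ⟨hp1, htl⟩ := hps
    have hi : ∀ w l, d.get? w = some l → p.1 ∉ l := by
      intro w l h hmem
      exact absurd (hlt w l h p.1 hmem p (List.mem_cons_self)) (lt_irrefl p.1)
    have hEnd : (pvInner p.1 d (pvSplit p.2)).keys.Nodup := pv_nodup_inner _ _ _ hnd
    have hElt : ∀ w l, (pvInner p.1 d (pvSplit p.2)).get? w = some l → ∀ j ∈ l, ∀ q ∈ tl, j < q.1 := by
      intro w l h j hj q hq
      rw [pv_inner_get? p.1 d (pvSplit p.2) w hi] at h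
      cases hd : d.get? w with
      | some l0 =>
        rw [hd] at h
        simp only [Option.some.injEq] at h
        subst h
        by_cases hw : w ∈ pvSplit p.2
        · rw [if_pos hw] at hj
          rcases List.mem_append.1 hj with hj | hj
          · exact hlt w l0 hd j hj q (List.mem_cons_of_mem _ hq)
          · simp only [List.mem_singleton] at hj; subst hj; exact hp1 q hq
        · rw [if_neg hw] at hj
          exact hlt w l0 hd j hj q (List.mem_cons_of_mem _ hq)
      | none =>
        rw [hd] at h
        by_cases hw : w ∈ pvSplit p.2
        · rw [if_pos hw] at h
          simp only [Option.some.injEq] at h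
          subst h
          simp only [List.mem_singleton] at hj; subst hj; exact hp1 q hq
        · rw [if_neg hw] at h; exact absurd h (by simp)
    have hstep : pvProc (p :: tl) d = pvProc tl (pvInner p.1 d (pvSplit p.2)) := by
      simp only [pvProc, List.foldl_cons]
    rw [hstep, ih (pvInner p.1 d (pvSplit p.2)) v hEnd hElt htl,
        pv_inner_get? p.1 d (pvSplit p.2) v hi]
    have hmv : pvMv (p :: tl) v = (if v ∈ pvSplit p.2 then [p.1] else []) ++ pvMv tl v := by
      by_cases hv : v ∈ pvSplit p.2 <;> simp [pvMv, hv]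
    cases hd : d.get? v with
    | some l =>
      by_cases hv : v ∈ pvSplit p.2 <;> simp [hv, hmv, List.append_assoc]
    | none =>
      by_cases hv : v ∈ pvSplit p.2
      · simp [hv, hmv, List.mem_flatMap]
      · simp only [if_neg hv]
        have hmem : (v ∈ (p :: tl).flatMap (fun p => pvSplit p.2)) ↔ (v ∈ tl.flatMap (fun p => pvSplit p.2)) := by
          simp only [List.flatMap_cons, List.mem_append]
          exact or_iff_right hv
        rw [hmv, if_neg hv, List.nil_append]
        by_cases hm : v ∈ tl.flatMap (fun p => pvSplit p.2)
        · rw [if_pos hm, if_pos (hmem.2 hm)]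
        · rw [if_neg hm, if_neg (fun h => hm (hmem.1 h))]

theorem pv_enumerate_map {α β : Type} (f : α → β) (xs : List α) (s : Int) :
    PySem.List.enumerate (xs.map f) s = (PySem.List.enumerate xs s).map (fun p => (p.1, f p.2)) := by
  induction xs generalizing s with
  | nil => simp [PySem.List.enumerate_nil]
  | cons x t ih => simp [PySem.List.enumerate_cons, ih]

theorem pv_flatMap_enumerate {α β : Type} (g : α → List β) (xs : List α) (s : Int) :
    (PySem.List.enumerate xs s).flatMap (fun p => g p.2) = xs.flatMap g := by
  induction xs generalizing s with
  | nil => simp [PySem.List.enumerate_nil]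
  | cons x t ih => simp [PySem.List.enumerate_cons, ih]

theorem pv_A_eq_proc (strings : List String) :
    indices_of_words strings = (pvProc (PySem.List.enumerate strings 0) PySem.Dict.empty).items := by
  unfold indices_of_words pvProc
  rw [PySem.List.enumerate_eq_map_pyRange (d := ""), List.foldl_map]
  congr 1
  apply pv_foldl_congr
  · intro d j hd
    apply pv_foldl_congr (fun results word =>
        match results.get? word with
        | none => results.insert word [j]
        | some l => if j ∈ l then results else results.insert word (l ++ [j]))
      (fun d w => d.insert w (pvNv j d w))
      (fun d w hd => pv_stepA_eq d j w hd)
      (fun d w hd => PySem.Dict.nodup_keys_insert d w (pvNv j d w) hd)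
      _ d hd
  · intro d p hd
    exact pv_nodup_inner _ _ _ hd
  · exact PySem.Dict.nodup_keys_empty

theorem pv_B_eq (strings : List String) :
    indices_of_words_alt strings =
      (PySem.Set.ofList ((PySem.List.enumerate strings 0).flatMap (fun p => pvSplit p.2))).map
        (fun w => (w, pvMv (PySem.List.enumerate strings 0) w)) := by
  unfold indices_of_words_alt
  dsimp only
  rw [PySem.List.dedup_eq_ofList]
  have h1 : (strings.map (fun s => pvSplit s)).flatMap (fun ws => ws)
      = (PySem.List.enumerate strings 0).flatMap (fun p => pvSplit p.2) := by
    rw [pv_flatMap_enumerate]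
    simp [List.flatMap_map]
  rw [h1]
  apply List.map_congr_left
  intro w hw
  rw [pv_enumerate_map]
  simp [pvMv, List.filter_map, List.map_map, Function.comp_def]

-- ===== VERDICT (by name: the statement is the Claim_ definition above) =====
theorem indices_of_words_spec : Claim_equal_indices_of_words := by
  intro strings _
  show indices_of_words strings = indices_of_words_alt strings
  rw [pv_A_eq_proc, pv_B_eq]
  have hnd : (PySem.Dict.empty : PySem.Dict String (List Int)).keys.Nodup := PySem.Dict.nodup_keys_empty
  rw [PySem.Dict.items_eq_map_keys _ (pv_nodup_proc _ _ hnd) [], pv_keys_proc]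
  rw [show (PySem.Dict.empty : PySem.Dict String (List Int)).keys = [] from rfl,
      PySem.Set.update_nil_left]
  apply List.map_congr_left
  intro w hw
  have hg := pv_proc_get? (PySem.List.enumerate strings 0) PySem.Dict.empty w hnd
    (by intro w l h; rw [PySem.Dict.get?_empty] at h; exact absurd h (by simp))
    (PySem.List.pairwise_lt_enumerate strings 0)
  rw [PySem.Dict.get?_empty] at hg
  have hmem : w ∈ (PySem.List.enumerate strings 0).flatMap (fun p => pvSplit p.2) :=
    (PySem.Set.mem_ofList _ _).1 hw
  simp only [if_pos hmem] at hg
  rw [PySem.Dict.getD_eq_get?_getD, hg]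
  rfl
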